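-- pv_equiv track=rewrite | github.com/blad00/HPCTutorial | 05Funtions.py | chemify
-- ===== SOURCE A (Python) =====
-- def chemifyWord(word):
--     """
--     >>> chemifyWord('California')
--     'Californium'
--     >>> chemifyWord('BERKELEY')
--     'BERKELium'
--     >>> chemifyWord('of')
--     'ofium'
--     >>> chemifyWord('Belgium')
--     'Belgium'
--     """
--
--     # determine word stem by removing all vowels at the end of the word
--     word = word.rstrip('aeiouyAEIOUY')
--     """
--     # alternative implementation
--     while word and word[-1].lower() in 'aeiouy':
--         word = word[:-1]
--     """
--     # append suffix -ium to word stem (if this is not already the case)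
--     if not word.endswith('ium'):
--         word += 'ium'
--     # return modified word
--     return word
--
-- def chemify(sentence):
--     """
--     >>> chemify('University of California, Berkeley')
--     'Universitium ofium Californium, Berkelium'
--     >>> chemify('Ghent University, Belgium')
--     'Ghentium Universitium, Belgium'
--     >>> chemify('Cooking is chemistry, really.')
--     'Cookingium isium chemistrium, reallium.'
--     >>> chemify('To think is to practice brain chemistry.')
--     'Tium thinkium isium tium practicium brainium chemistrium.'
--     >>> chemify('I guess chemistry is just another word for love.')
--     'ium guessium chemistrium isium justium anotherium wordium forium lovium.'
--     """
--
--     # process separate words in sentence, using the definition that a word is a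
--     # longest possible sequence of consecutive letters
--     modified = ''
--     word = ''
--     for character in sentence:
--         if character.isalpha():
--             word += character
--         else:
--             if word:
--                 modified += chemifyWord(word)
--                 word = ''
--             modified += character
--     # process last word if unprocessed (happens when sentence ends in a letter)
--     if word:
--         modified += chemifyWord(word)
--
--     # return modified sentence
--     return modified
--
--     """
--     # alternative implementation that uses regular expressions
--     # replace all words by their chemified version
--     import re
--     return re.sub(
--         '[a-z]+',
--         lambda word: chemifyWord(word.group(0)),
--         sentence,
--         flags=re.IGNORECASE
--     )
--     """
-- ===== SOURCE B (Python) =====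
-- def chemifyWord(word):
--     word = word.rstrip('aeiouyAEIOUY')
--     if not word.endswith('ium'):
--         word += 'ium'
--     return word
--
-- def chemify(sentence):
--     # span tokenizer: slice out each maximal alphabetic run at once instead of
--     # accumulating characters one by one
--     pieces = []
--     i, n = 0, len(sentence)
--     while i < n:
--         if sentence[i].isalpha():
--             j = i
--             while j < n and sentence[j].isalpha():
--                 j += 1
--             pieces.append(chemifyWord(sentence[i:j]))
--             i = j
--         else:
--             pieces.append(sentence[i])
--             i += 1
--     return ''.join(pieces)
-- ===== Notes on version B (the rewrite author's own statement) =====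
-- stated objective: alternative
-- what changed: Replaced A's char-by-char accumulator loop with pending-word state by a span tokenizer that slices out each maximal alphabetic run at once and joins the chemified pieces.
import Mathlib
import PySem

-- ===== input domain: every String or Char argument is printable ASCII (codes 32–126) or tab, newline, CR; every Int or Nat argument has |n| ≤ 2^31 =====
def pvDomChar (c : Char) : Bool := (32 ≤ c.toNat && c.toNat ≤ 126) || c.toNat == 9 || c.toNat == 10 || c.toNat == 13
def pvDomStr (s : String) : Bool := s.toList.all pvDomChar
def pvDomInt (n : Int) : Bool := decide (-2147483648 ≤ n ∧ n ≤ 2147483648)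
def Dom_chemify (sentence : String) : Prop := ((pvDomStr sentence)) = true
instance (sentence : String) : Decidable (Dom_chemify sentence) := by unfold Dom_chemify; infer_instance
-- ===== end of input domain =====

-- B replaces A's char-by-char accumulator loop by a span tokenizer over maximal alphabetic runs (alternative decomposition, same cost).


-- shared helper: both Pythons define this same chemifyWord
-- word.rstrip('aeiouyAEIOUY') ported by hand as reverse/dropWhile/reverse (exact: rstrip with a char set drops trailing chars of the set)
def chemifyWord (word : List Char) : List Char :=
  let w := (word.reverse.dropWhile (fun c => c ∈ "aeiouyAEIOUY".toList)).reverse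
  if PySem.Chars.endswith w "ium".toList then w else w ++ "ium".toList

-- ===== PORT A =====
-- the loop state: (modified, word)
def chemifyStep (st : List Char × List Char) (c : Char) : List Char × List Char :=
  if PySem.Chars.isalpha c then (st.1, st.2 ++ [c])
  else if st.2 ≠ [] then (st.1 ++ chemifyWord st.2 ++ [c], [])
  else (st.1 ++ [c], [])

def chemify (sentence : String) : String :=
  let st := sentence.toList.foldl chemifyStep ([], [])
  String.mk (if st.2 ≠ [] then st.1 ++ chemifyWord st.2 else st.1)

-- ===== PORT B =====
-- Source B's outer while loop as structural recursion; its inner 'while j < n and isalpha' run-scan is takeWhile/dropWhile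
def chemTokens (l : List Char) : List Char :=
  match l with
  | [] => []
  | c :: cs =>
    if PySem.Chars.isalpha c then
      chemifyWord (c :: cs.takeWhile PySem.Chars.isalpha) ++ chemTokens (cs.dropWhile PySem.Chars.isalpha)
    else c :: chemTokens cs
termination_by l.length
decreasing_by
  · have := cs.length_dropWhile_le PySem.Chars.isalpha; simp; omega
  · simp

def chemify_alt (sentence : String) : String :=
  String.mk (chemTokens sentence.toList)

-- ===== PRECONDITION & SPEC =====
def Spec_chemify (sentence : String) (out : String) : Prop := out = chemify_alt sentence
instance (sentence : String) (out : String) : Decidable (Spec_chemify sentence out) := by unfold Spec_chemify; infer_instance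

-- ===== CLAIM (what is proved, stated in full; the proofs are below) =====
def Claim_equal_chemify : Prop := ∀ (sentence : String), Dom_chemify sentence → Spec_chemify sentence (chemify sentence)

-- ===== LEMMAS AND PROOFS =====

-- folding A's step over an all-alphabetic run only extends the pending word
lemma foldl_step_alpha (w : List Char) (hw : ∀ c ∈ w, PySem.Chars.isalpha c)
    (r : List Char) (mod word : List Char) :
    (w ++ r).foldl chemifyStep (mod, word) = r.foldl chemifyStep (mod, word ++ w) := by
  induction w generalizing word with
  | nil => simp
  | cons c cs ih =>
    have hc : PySem.Chars.isalpha c := hw c (by simp)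
    simp only [List.cons_append, List.foldl_cons, chemifyStep, hc, if_pos]
    rw [ih (fun d hd => hw d (by simp [hd]))]
    simp

-- main invariant: A's fold from state (mod, []) finishes as mod ++ B's tokens
lemma chemify_main : ∀ n (l : List Char), l.length ≤ n → ∀ mod : List Char,
    (let st := l.foldl chemifyStep (mod, []);
     if st.2 ≠ [] then st.1 ++ chemifyWord st.2 else st.1) = mod ++ chemTokens l := by
  intro n
  induction n with
  | zero =>
    intro l hl mod
    have : l = [] := List.eq_nil_of_length_eq_zero (by omega)
    subst this; simp [chemTokens]
  | succ n ih =>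
    intro l hl mod
    match l with
    | [] => simp [chemTokens]
    | c :: cs =>
      simp only [List.length_cons] at hl
      by_cases hc : PySem.Chars.isalpha c
      · -- alphabetic run: the fold swallows the whole run into the pending word
        have hsplit : c :: cs = (c :: cs.takeWhile PySem.Chars.isalpha)
            ++ cs.dropWhile PySem.Chars.isalpha := by
          simp [cs.takeWhile_append_dropWhile]
        have halpha : ∀ d ∈ c :: cs.takeWhile PySem.Chars.isalpha, PySem.Chars.isalpha d := by
          intro d hd
          rcases List.mem_cons.mp hd with h | h
          · simp [h, hc]
          · exact List.mem_takeWhile_imp h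
        have hB : chemTokens (c :: cs)
            = chemifyWord (c :: cs.takeWhile PySem.Chars.isalpha)
              ++ chemTokens (cs.dropWhile PySem.Chars.isalpha) := by
          rw [chemTokens]; simp [hc]
        rw [hB]
        conv_lhs => rw [hsplit, foldl_step_alpha _ halpha]
        simp only [List.nil_append]
        cases hr2 : cs.dropWhile PySem.Chars.isalpha with
        | nil => simp [chemTokens]
        | cons d ds =>
          have hd : ¬ PySem.Chars.isalpha d := by
            have hne : cs.dropWhile PySem.Chars.isalpha ≠ [] := by simp [hr2]
            have := List.head_dropWhile_not PySem.Chars.isalpha hne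
            simp [hr2] at this; simp [this]
          have hdslen : ds.length ≤ n := by
            have h1 := cs.length_dropWhile_le PySem.Chars.isalpha
            rw [hr2] at h1; simp at h1; omega
          have hBd : chemTokens (d :: ds) = d :: chemTokens ds := by
            rw [chemTokens]; simp [hd]
          simp [chemifyStep, hd, hBd, ih ds hdslen]
      · -- non-alphabetic head is emitted directly
        have hB : chemTokens (c :: cs) = c :: chemTokens cs := by
          rw [chemTokens]; simp [hc]
        simp [chemifyStep, hc, hB, ih cs (by omega)]

-- ===== VERDICT (by name: the statement is the Claim_ definition above) =====
theorem chemify_spec : Claim_equal_chemify := by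
  intro s _
  unfold Spec_chemify chemify chemify_alt
  have h := chemify_main s.toList.length s.toList le_rfl []
  simp only [List.nil_append] at h
  exact congrArg String.mk h
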